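-- pv_equiv track=rewrite | github.com/cirosantilli/project-euler-solvers | solvers/182.py | solve
-- ===== SOURCE A (Python) =====
-- import math
--
-- def is_coprime(a: int, b: int) -> bool:
--     if ((a | b) & 1) == 0:
--         return False
--     return math.gcd(a, b) == 1
--
-- def solve(p: int, q: int) -> int:
--     phi = (p - 1) * (q - 1)
--
--     best = 0xFFFFFFFF
--     total = 0
--
--     for encryption in range(phi):
--         if not is_coprime(encryption, phi):
--             continue
--         bad_p = math.gcd(p - 1, encryption - 1) + 1
--         bad_q = math.gcd(q - 1, encryption - 1) + 1
--         num_plaintext = bad_p * bad_q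
--
--         if best == num_plaintext:
--             total += encryption
--         elif best > num_plaintext:
--             best = num_plaintext
--             total = encryption
--
--     return total
-- ===== SOURCE B (Python) =====
-- import math
--
-- def is_coprime(a: int, b: int) -> bool:
--     if ((a | b) & 1) == 0:
--         return False
--     return math.gcd(a, b) == 1
--
-- def solve(p: int, q: int) -> int:
--     phi = (p - 1) * (q - 1)
--
--     # pass 1: find the minimum unconcealed-message count (sentinel if none)
--     best = 0xFFFFFFFF
--     for e in range(phi):
--         if not is_coprime(e, phi):
--             continue
--         v = (math.gcd(p - 1, e - 1) + 1) * (math.gcd(q - 1, e - 1) + 1)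
--         if v < best:
--             best = v
--
--     # pass 2: sum the exponents achieving that minimum
--     total = 0
--     for e in range(phi):
--         if not is_coprime(e, phi):
--             continue
--         if (math.gcd(p - 1, e - 1) + 1) * (math.gcd(q - 1, e - 1) + 1) == best:
--             total += e
--     return total
-- ===== Notes on version B (the rewrite author's own statement) =====
-- stated objective: alternative
-- what changed: A's single online pass with a min-with-reset accumulator (best, total) is replaced by two independent passes: first compute the minimum bad_p*bad_q over coprime exponents, then sum the exponents attaining it.
import Mathlib
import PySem

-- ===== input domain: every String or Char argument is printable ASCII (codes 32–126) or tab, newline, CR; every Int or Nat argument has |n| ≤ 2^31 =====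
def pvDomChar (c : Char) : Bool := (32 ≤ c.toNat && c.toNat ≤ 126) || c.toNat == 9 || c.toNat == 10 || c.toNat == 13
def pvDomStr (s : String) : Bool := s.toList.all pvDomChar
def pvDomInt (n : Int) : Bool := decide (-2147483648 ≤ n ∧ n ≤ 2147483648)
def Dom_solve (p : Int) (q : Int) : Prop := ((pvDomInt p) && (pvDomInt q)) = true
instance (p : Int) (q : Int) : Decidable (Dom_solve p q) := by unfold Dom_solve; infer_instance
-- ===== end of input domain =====

-- B replaces A's single online min-with-reset accumulator by two independent passes
-- (compute the minimum, then sum the exponents attaining it); same cost, no speed claim.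

-- ===== PORT A =====
-- shared module helper is_coprime (used verbatim by both Source A and Source B)
def isCoprime (a : Int) (b : Int) : Bool :=
  if PySem.Int.band (PySem.Int.bor a b) 1 == 0 then false
  else Int.gcd a b == 1

-- num_plaintext = bad_p * bad_q, as computed in both loop bodies
def numPlaintext (p : Int) (q : Int) (e : Int) : Int :=
  ((Int.gcd (p - 1) (e - 1) : Int) + 1) * ((Int.gcd (q - 1) (e - 1) : Int) + 1)

-- A's loop body over state (best, total)
def stepA (p : Int) (q : Int) (phi : Int) (s : Int × Int) (e : Int) : Int × Int :=
  if ¬ isCoprime e phi then s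
  else
    let np := numPlaintext p q e
    if s.1 == np then (s.1, s.2 + e)
    else if s.1 > np then (np, e)
    else s

def solve (p : Int) (q : Int) : Int :=
  let phi := (p - 1) * (q - 1)
  ((PySem.List.pyRange 0 phi 1).foldl (stepA p q phi) (0xFFFFFFFF, 0)).2

-- ===== PORT B =====
-- pass 1 body: minimum of num_plaintext over coprime exponents
def stepMin (p : Int) (q : Int) (phi : Int) (b : Int) (e : Int) : Int :=
  if ¬ isCoprime e phi then b
  else
    let v := numPlaintext p q e
    if v < b then v else b

-- pass 2 body: sum the exponents whose num_plaintext equals best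
def stepSum (p : Int) (q : Int) (phi : Int) (best : Int) (t : Int) (e : Int) : Int :=
  if ¬ isCoprime e phi then t
  else if numPlaintext p q e == best then t + e
  else t

def solve_alt (p : Int) (q : Int) : Int :=
  let phi := (p - 1) * (q - 1)
  let best := (PySem.List.pyRange 0 phi 1).foldl (stepMin p q phi) 0xFFFFFFFF
  (PySem.List.pyRange 0 phi 1).foldl (stepSum p q phi best) 0

-- ===== PRECONDITION & SPEC =====
def Spec_solve (p : Int) (q : Int) (out : Int) : Prop := out = solve_alt p q
instance (p : Int) (q : Int) (out : Int) : Decidable (Spec_solve p q out) := by unfold Spec_solve; infer_instance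

-- ===== CLAIM (what is proved, stated in full; the proofs are below) =====
def Claim_equal_solve : Prop := ∀ (p : Int) (q : Int), Dom_solve p q → Spec_solve p q (solve p q)

-- ===== LEMMAS AND PROOFS =====

-- the running minimum never exceeds its starting value
lemma stepMin_le (p q phi : Int) : ∀ (L : List Int) (b : Int),
    L.foldl (stepMin p q phi) b ≤ b := by
  intro L
  induction L with
  | nil => intro b; simp
  | cons e L ih =>
    intro b
    simp only [List.foldl_cons]
    refine le_trans (ih _) ?_
    unfold stepMin
    split_ifs <;> simp <;> omega

-- the sum pass is additive in its accumulator
lemma stepSum_add (p q phi best : Int) : ∀ (L : List Int) (t : Int),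
    L.foldl (stepSum p q phi best) t = t + L.foldl (stepSum p q phi best) 0 := by
  intro L
  induction L with
  | nil => intro t; simp
  | cons e L ih =>
    intro t
    simp only [List.foldl_cons]
    rw [ih, ih (stepSum p q phi best 0 e)]
    unfold stepSum
    split_ifs <;> simp <;> omega

-- main invariant: A's fold from (b, t) yields B's minimum, and B's matching sum
-- shifted by t exactly when the minimum is still the initial b
lemma foldA_eq (p q phi : Int) : ∀ (L : List Int) (b t : Int),
    L.foldl (stepA p q phi) (b, t) =
      (L.foldl (stepMin p q phi) b,
       (if L.foldl (stepMin p q phi) b = b then t else 0) +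
         L.foldl (stepSum p q phi (L.foldl (stepMin p q phi) b)) 0) := by
  intro L
  induction L with
  | nil => intro b t; simp
  | cons e L ih =>
    intro b t
    simp only [List.foldl_cons]
    by_cases hc : isCoprime e phi = true
    · set v := numPlaintext p q e with hv
      by_cases heq : b = v
      · -- tie with the current best: A adds e; the minimum is unchanged
        have h1 : stepA p q phi (b, t) e = (b, t + e) := by
          unfold stepA; simp [hc, ← hv, heq]
        have h2 : stepMin p q phi b e = b := by
          unfold stepMin; simp [hc, ← hv, heq]
        rw [h1]; simp only [h2]; rw [ih]
        set m := L.foldl (stepMin p q phi) b with hm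
        rw [stepSum_add p q phi m L (stepSum p q phi m 0 e)]
        by_cases hmb : m = b
        · have hvm : v = m := by omega
          have hs : stepSum p q phi m 0 e = e := by
            unfold stepSum; simp [hc, ← hv, hvm]
          rw [hs]; simp [hmb]; omega
        · have hvm : ¬ (v = m) := by omega
          have hs : stepSum p q phi m 0 e = 0 := by
            unfold stepSum; simp [hc, ← hv, hvm]
          rw [hs]; simp [hmb]
      · by_cases hlt : v < b
        · -- strictly smaller: A resets (best, total) := (v, e)
          have h1 : stepA p q phi (b, t) e = (v, e) := by
            unfold stepA; simp [hc, ← hv, heq, hlt]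
          have h2 : stepMin p q phi b e = v := by
            unfold stepMin; simp [hc, ← hv, hlt]
          rw [h1]; simp only [h2]; rw [ih]
          set m := L.foldl (stepMin p q phi) v with hm
          have hmv : m ≤ v := stepMin_le p q phi L v
          have hmb : ¬ (m = b) := by omega
          rw [stepSum_add p q phi m L (stepSum p q phi m 0 e)]
          by_cases hmveq : v = m
          · have hs : stepSum p q phi m 0 e = e := by
              unfold stepSum; simp [hc, ← hv, hmveq]
            rw [hs]; simp [hmb, hmveq.symm]; omega
          · have hs : stepSum p q phi m 0 e = 0 := by
              unfold stepSum; simp [hc, ← hv, hmveq]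
            have hne : ¬ (m = v) := fun h => hmveq h.symm
            rw [hs]; simp [hmb, hne]
        · -- strictly larger: all three folds skip e
          have h1 : stepA p q phi (b, t) e = (b, t) := by
            unfold stepA; simp [hc, ← hv, heq]
            omega
          have h2 : stepMin p q phi b e = b := by
            unfold stepMin; simp [hc, ← hv, hlt]
          rw [h1]; simp only [h2]; rw [ih]
          set m := L.foldl (stepMin p q phi) b with hm
          have hmb : m ≤ b := stepMin_le p q phi L b
          have hvm : ¬ (v = m) := by omega
          have hs : stepSum p q phi m 0 e = 0 := by
            unfold stepSum; simp [hc, ← hv, hvm]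
          rw [stepSum_add p q phi m L (stepSum p q phi m 0 e), hs]
          simp
    · -- not coprime: all three folds skip e
      have h1 : stepA p q phi (b, t) e = (b, t) := by unfold stepA; simp [hc]
      have h2 : stepMin p q phi b e = b := by unfold stepMin; simp [hc]
      rw [h1]; simp only [h2]; rw [ih]
      set m := L.foldl (stepMin p q phi) b
      have hs : stepSum p q phi m 0 e = 0 := by unfold stepSum; simp [hc]
      rw [stepSum_add p q phi m L (stepSum p q phi m 0 e), hs]
      simp

-- ===== VERDICT (by name: the statement is the Claim_ definition above) =====
theorem solve_spec : Claim_equal_solve := by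
  intro p q _
  show ((PySem.List.pyRange 0 ((p-1)*(q-1)) 1).foldl (stepA p q ((p-1)*(q-1))) (0xFFFFFFFF, 0)).2 =
    (PySem.List.pyRange 0 ((p-1)*(q-1)) 1).foldl
      (stepSum p q ((p-1)*(q-1))
        ((PySem.List.pyRange 0 ((p-1)*(q-1)) 1).foldl (stepMin p q ((p-1)*(q-1))) 0xFFFFFFFF)) 0
  rw [foldA_eq]
  split_ifs <;> simp
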